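/-
  THE SEGMENTS OF `digest_file` (gif_driver.c:147-176; 146 instructions at 1057C0H; NO protected frame: six pushes and
  `sub rsp, 40`; contract: Gif/Spec/Driver.lean `digest_file.spec`; design/units/digest_file.tsv).

      unit  from      to (exits)               what it walks
      1     1057C0H   10580BH                  the six pushes, `sub rsp, 40`, `r12 = gif`, `[rsp+0x18] = pixels`; the checked loads of
                                               `SWidth`, `SHeight` with their `digest_int` (l.151-152)                   (20 instructions)
      2     10580BH   10585AH                  the checked loads of `SColorResolution`, `SBackGroundColor`, `AspectByte` (a byte) with
                                               their `digest_int` (l.153-155)                                            (18)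
      3     10585AH   1059AFH                  the checked load of `SColorMap`, `digest_map` (l.156); the checked load of `ImageCount`,
                                               kept in `[rsp+0xc]` FOR THE WHOLE LOOP, `digest_int` (l.157); `[rsp] = h`, `r13d = k = 0`,
                                               `[rsp+0x10] = total = 0`; to the loop head                                 (17)
      4     1059AFH   10591AH | 1059BAH        THE LOOP TEST `k < ImageCount` (`cmp [rsp+0xc], r13d ; jg`); false: to 1059BAH; the checked
                                               load of `SavedImages` (RE-LOADED every round), `rbx = sp = arr + 56·k` (l.159); the checked
                                               loads of `Width`, `Height`, `rbp = n` = their 64-bit product (l.160-161); the checked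
                                               loads of `Left`, `Top` with their `digest_int` (l.162-163)                 (29)
      5     10591AH   10594BH                  `digest_int` of `Width` (`r15d`), `Height` (`r14d`), the checked byte load of `Interlace`
                                               with its `digest_int` (l.164-166)                                          (13)
      6     10594BH   1059AFH                  the checked load of `sp->ImageDesc.ColorMap`, `digest_map` (l.167); of `sp->RasterBits`,
                                               `digest_bytes(h, raster, n)` (l.168); of `sp->ExtensionBlocks`, `ExtensionBlockCount`,
                                               `digest_extensions` (l.169); `[rsp] = h`, `total += n`, `k++`; back to the head with a
                                               smaller measure                                                            (25)
      7     1059BAH   ret                      the checked loads of `gif->ExtensionBlocks`, `ExtensionBlockCount`, `digest_extensions` of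
                                               the pending list (l.172); THE CHECKED 8-BYTE STORE `*pixels = total` (l.173); `rax = h`,
                                               `add rsp, 40`, six pops, `ret`                                             (24)
      COMPOSITION                              `compose`, proved below: the loop by strong induction on the measure `length − k`

  THE MEMORY DOES NOT CHANGE outside the function's 224 bytes of stack until the last store: the heap `H`, the forest `F`, the shadow
  are the entry's, and `GifOK H F R` holds of the present memory at every cut. The digest value (in `rbx`, `r14`, `r15`, `rax`,
  `[rsp]`) and the pixel total (`[rsp+0x10]`) are never constrained: no access depends on them.
  THE STACK LOCALS (`rsp = RA − 88`): `[rsp]` = RA − 88: `h`; `[rsp+0xc]` = RA − 76: `ImageCount` (4 bytes); `[rsp+0x10]` = RA − 72: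
  `total`; `[rsp+0x18]` = RA − 64: `pixels`.

  WHY `GifOK` CAN BE CARRIED: the contract's precondition is `Env H rest frames F R` (with the context `Ctx rest frames R`): with
  `HeapPre`'s shadow layer `Ctx.cursor_range` gives `rsp + 8 ≤ R.cur`: the function's stack lies BELOW the cursor (`Loose.stack`), and
  `GifOK.sameExcept` carries the state invariant over every callee's footprint. Every load of the function takes its address from a
  field whose value `GifOK` of the PRESENT memory gives.
  `*pixels` LIES ABOVE THE RETURN ADDRESS (`pixels_above`): the store at 1059F9H changes no slot the pops and the `ret` read.
-/
import Gif.Spec.Driver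
import Gif.Spec.ForestCarry
import Gif.LabelsAt
namespace Gif.Spec
open X86 X86.User Asan ProgX.Base ProgX.Base.Spec

namespace digest_file

/-- **INSIDE `digest_file`**, at the address `cut`, inside the call that was entered at the state `e` (return address `ret`) with the
function's precondition. Six registers saved (`r15 r14 r13 r12 rbp rbx` in push order: every callee-saved register),
`rsp = RA − 88`, `r12 = gif`, the argument `pixels` in its slot `[rsp+0x18]`; no protected frame: the active frames are the entry's;
the heap's invariant and the state invariant hold for the entry's heap and forest of the present memory; no shadow byte was written;
nothing was written but the function's 224 bytes of stack (and, in segment 7, `*pixels`). What `rbx rbp r13 r14 r15` hold is said by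
the assertion of each cut. Used as it is at
  10580BH, 10585AH (`rbx = h`: any value),
  1059BAH (behind the loop; `[rsp] = h`, `[rsp+0x10] = total`: any values). -/
structure At (cut : Word) (H : Heap) (rest : List Obj) (frames : List (Nat × FrameLayout)) (F : Forest) (R : Rd) (u₀ e : State)
    (ret : Word) (v : State) : Prop where
  /-- the function was entered at `e` … -/
  entry : AtEntry (conv u₀) Gif.L.digest_file.entry (digest_file.spec H rest frames F R).frame ret e
  /-- … with its precondition: `Env H rest frames F R e` (`HeapPre`, `Ctx`, `GifOK` of `e.mem`), `F.Complete`, `rdi = F.gif`,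
  `pixels` = 8 live bytes in the stack region -/
  pre : (digest_file.spec H rest frames F R).pre e
  rip : v.rip = cut
  /-- six pushes and `sub rsp, 40` below the return address -/
  rsp : v.reg .rsp = e.reg .rsp - 88
  /-- `mov r12, rdi` (1057CEH): `gif` -/
  r12 : v.reg .r12 = e.reg .rdi
  /-- the saved registers, in push order: the six pops at 105A03H … 105A0BH (segment 7) read them -/
  slot_r15 : v.mem.readLE (e.reg .rsp - 8) 8 = (e.reg .r15).toNat
  slot_r14 : v.mem.readLE (e.reg .rsp - 16) 8 = (e.reg .r14).toNat
  slot_r13 : v.mem.readLE (e.reg .rsp - 24) 8 = (e.reg .r13).toNat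
  slot_r12 : v.mem.readLE (e.reg .rsp - 32) 8 = (e.reg .r12).toNat
  slot_rbp : v.mem.readLE (e.reg .rsp - 40) 8 = (e.reg .rbp).toNat
  slot_rbx : v.mem.readLE (e.reg .rsp - 48) 8 = (e.reg .rbx).toNat
  /-- the return address is still in its slot: the `ret` at 105A0DH (segment 7) pops it -/
  slot_ra : UInt64.ofNat (v.mem.readLE (e.reg .rsp) 8) = ret
  /-- `mov [rsp+0x18], rsi` (1057D1H): `pixels`, re-loaded at 1059E7H -/
  slot_pixels : v.mem.readLE (e.reg .rsp - 64) 8 = (e.reg .rsi).toNat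
  /-- the heap's invariant for the entry's heap and frames, the clean stack ending at the present stack pointer -/
  inv : HeapInv H rest frames ((e.reg .rsp).toNat - 88) v.mem
  /-- THE STATE INVARIANT of the present memory (only stack was written) -/
  ok : GifOK H F R v.mem
  /-- no shadow byte was written (the contract's post) -/
  un : ShadowUntouched e.mem v.mem
  /-- nothing was written but the function's stack (the contract's 224 bytes) and the contract's window `*pixels` -/
  same : Mem.SameExcept
    [⟨(e.reg .rsp).toNat - 224, (e.reg .rsp).toNat⟩,
     ⟨(e.reg .rsi).toNat, (e.reg .rsi).toNat + 8⟩] e.mem v.mem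
  code : (conv u₀).code.In v.mem
  abi : (conv u₀).inv v

/-- **THE HEAD OF THE IMAGE LOOP** (l.158, at 1059AFH `cmp DWORD PTR [rsp+0xc], r13d`), THE LOOP INVARIANT with the measure `m`: the
slot `[rsp+0xc]` holds `gif->ImageCount` = the number of counted images (loaded ONCE at 10587EH; `ok.shape.saved`), `r13 = k ≤` it (a
zero-extended 32-bit counter), `length − k = m`. `[rsp] = h`, `[rsp+0x10] = total`: any values. `rbx rbp r14 r15` are dead. -/
structure Head (m : Nat) (H : Heap) (rest : List Obj) (frames : List (Nat × FrameLayout)) (F : Forest) (R : Rd) (u₀ e : State)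
    (ret : Word) (v : State) : Prop where
  at_ : At Gif.L.digest_file.at_1059af H rest frames F R u₀ e ret v
  /-- `mov [rsp+0xc], eax` (105883H): `ImageCount` -/
  s_count : v.mem.readLE (e.reg .rsp - 76) 4 = F.imgs.length
  /-- the counter and the measure -/
  k_le : (v.reg .r13).toNat ≤ F.imgs.length
  measure : F.imgs.length - (v.reg .r13).toNat = m

/-- **INSIDE ONE ROUND** (at 10591AH `mov rdi, rax`, behind `digest_int(h, sp->ImageDesc.Top)`; at 10594BH `lea rdi, [rbx+0x18]`,
behind `digest_int(h, Interlace)`): as `Head`, with `k < length` (the test at 1059AFH): there IS an array `s`, `rbx = sp = s.arr +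
56·k` (l.159), and `rbp = n = Width · Height` of that slot (l.160-161, unsigned longs; by `RasterAt` and `F.Complete` it is the size
of the slot's raster, below `2^31`). At 10591AH `rax = h` and `r15d`, `r14d` hold `Width`, `Height` as ARGUMENTS of `digest_int` only:
any values. At 10594BH `r14 = h`: any value. -/
structure Round (cut : Word) (m : Nat) (H : Heap) (rest : List Obj) (frames : List (Nat × FrameLayout)) (F : Forest) (R : Rd)
    (u₀ e : State) (ret : Word) (v : State) : Prop where
  at_ : At cut H rest frames F R u₀ e ret v
  /-- `ImageCount`, in its slot -/
  s_count : v.mem.readLE (e.reg .rsp - 76) 4 = F.imgs.length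
  /-- the counter (strictly below the count) and the measure -/
  k_lt : (v.reg .r13).toNat < F.imgs.length
  measure : F.imgs.length - (v.reg .r13).toNat = m
  /-- the array and `sp` -/
  sp : ∃ s : Saved, F.saved = some s ∧ (v.reg .rbx).toNat = s.arr + 56 * (v.reg .r13).toNat
  /-- `n`: the product of the slot's `Width` and `Height` in the present memory -/
  n : (v.reg .rbp).toNat =
    SavedImage.ImageDesc.Width v.mem (v.reg .rbx).toNat * SavedImage.ImageDesc.Height v.mem (v.reg .rbx).toNat



/-! ### What the segments' proofs take from the state invariant, once -/

/-- The list of one element's objects is a sublist of the whole `flatMap`. -/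
theorem sublist_flatMap_mem {α β : Type} (f : α → List β) {l : List α} {a : α} (h : a ∈ l) : (f a).Sublist (l.flatMap f) := by
  induction l with
  | nil => exact absurd h List.not_mem_nil
  | cons x xs ih =>
    rw [List.flatMap_cons]
    rcases List.mem_cons.mp h with e | hin
    · rw [e]
      exact List.sublist_append_left _ _
    · exact (ih hin).trans (List.sublist_append_right _ _)

/-- **The screen's colour map is owned** (the second half of `digest_map`'s pre at 10586CH; the first is `ok.shape.scm`). -/
theorem owns_scm {H : Heap} {F : Forest} {R : Rd} {mem : Mem} (h : GifOK H F R mem) : Owns H (Map.objs F.scm) :=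
  (h.owns.perm (Forest.owned_scm F)).sublist (List.sublist_append_left _ _)

/-- **The pending extension list is owned** (`digest_extensions`'s pre at 1059DFH; the first half is `ok.shape.pend`). -/
theorem owns_pend {H : Heap} {F : Forest} {R : Rd} {mem : Mem} (h : GifOK H F R mem) : Owns H (Exts.objs F.pend) :=
  (h.owns.perm (Forest.owned_pend F)).sublist (List.sublist_append_left _ _)

/-- **The objects of one counted image are owned.** -/
theorem owns_img {H : Heap} {F : Forest} {R : Rd} {mem : Mem} (h : GifOK H F R mem) {s : Saved} (hs : F.saved = some s)
    {g : Img} (hg : g ∈ s.imgs) : Owns H (Img.objs g) := by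
  have h1 : Owns H (Saved.objs F.saved) := (h.owns.perm (Forest.owned_saved F)).sublist (List.sublist_append_left _ _)
  rw [hs, Saved.objs_some] at h1
  have h2 : Owns H (s.imgs.flatMap Img.objs) := h1.sublist (List.sublist_cons_self _ _)
  exact h2.sublist (sublist_flatMap_mem Img.objs hg)

/-- **The SavedImages array is owned**, with its exact size `56 · cap`: every counted slot lies inside it (`length ≤ cap`). -/
theorem owns_arr {H : Heap} {F : Forest} {R : Rd} {mem : Mem} (h : GifOK H F R mem) {s : Saved} (hs : F.saved = some s) :
    H.Live s.arr (56 * s.cap) := by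
  have h1 : Owns H (Saved.objs F.saved) := (h.owns.perm (Forest.owned_saved F)).sublist (List.sublist_append_left _ _)
  rw [hs, Saved.objs_some] at h1
  exact h1.live (s.arr, 56 * s.cap) List.mem_cons_self

/-- **The three parts of one counted image**: its colour map (`digest_map`'s pre at 10595BH), its raster — THERE IS ONE, by
`F.Complete`, live with its exact size (`digest_bytes`'s pre at 105976H) —, its extension list (`digest_extensions`'s pre at
10599DH). -/
theorem img_parts {H : Heap} {F : Forest} {R : Rd} {mem : Mem} (h : GifOK H F R mem) (hc : F.Complete) {s : Saved}
    (hs : F.saved = some s) {g : Img} (hg : g ∈ s.imgs) :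
    Owns H (Map.objs g.cm) ∧ (∃ r, g.raster = some r ∧ H.Live r.1 r.2) ∧ Owns H (Exts.objs g.ext) := by
  have ho := owns_img h hs hg
  unfold Img.objs at ho
  refine ⟨?_, ?_, ?_⟩
  · exact ho.sublist ((List.sublist_append_left _ _).trans (List.sublist_append_left _ _))
  · cases hr : g.raster with
    | none => exact absurd hr (hc s hs g hg)
    | some r =>
      refine ⟨r, rfl, ?_⟩
      apply ho.live r
      rw [hr]
      apply List.mem_append_left
      apply List.mem_append_right
      exact List.mem_singleton.mpr rfl
  · exact ho.sublist (List.sublist_append_right _ _)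

/-- **`gif->ImageCount` is the number of counted images**, with or without an array (what `[rsp+0xc]` holds from 105883H on). -/
theorem imageCount {F : Forest} {R : Rd} {mem : Mem} (h : Shape F R mem) : GifFileType.ImageCount mem F.gif = F.imgs.length := by
  have hsv := h.saved
  unfold SavedAt at hsv
  unfold Forest.imgs
  cases hs : F.saved with
  | none =>
    rw [hs] at hsv
    exact hsv.2
  | some s =>
    rw [hs] at hsv
    exact hsv.2.1

/-- **The counted slot `k`**: there is an array, `gif->SavedImages` points to it, and the slot agrees with the `k`-th image. -/
theorem slotAt {F : Forest} {R : Rd} {mem : Mem} (h : Shape F R mem) {k : Nat} (hk : k < F.imgs.length) :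
    ∃ (s : Saved) (hk' : k < s.imgs.length), F.saved = some s ∧ GifFileType.SavedImages mem F.gif = s.arr ∧
      s.imgs.length ≤ s.cap ∧ ImgAt (s.arr + 56 * k) s.imgs[k] mem := by
  have hsv := h.saved
  unfold SavedAt at hsv
  unfold Forest.imgs at hk
  cases hs : F.saved with
  | none =>
    rw [hs] at hk
    exact absurd hk (Nat.not_lt_zero k)
  | some s =>
    rw [hs] at hsv hk
    obtain ⟨k1, _, k3, _, k5⟩ := hsv
    exact ⟨s, hk, rfl, k1, k3, k5 k hk⟩

/-- **`*pixels` lies above the return address**: it is 8 live bytes in the stack region, so a stack object of an active protected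
frame (every other live object is off the stack: `ShadowInv.off`), and every active frame lies at or above the clean stack's end
`rsp + 8`. So the store `*pixels = total` at 1059F9H (segment 7) meets none of the function's own slots: the six saved registers and
the return address, which the pops and the `ret` behind it read. -/
theorem pixels_above {H : Heap} {rest : List Obj} {frames : List (Nat × FrameLayout)} {F : Forest} {R : Rd} {e : State}
    (hp : (digest_file.spec H rest frames F R).pre e) : (e.reg .rsp).toNat + 8 ≤ (e.reg .rsi).toNat := by
  obtain ⟨henv, _, _, hlive, hlo, hhi⟩ := hp
  have hsh := henv.heap.inv.shadow
  obtain ⟨o, ho, k1, k2⟩ := hlive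
  rcases List.mem_append.mp ho with hst | hoth
  · obtain ⟨bF, hbF, g1, _⟩ := ShadowInv.stackObj_gran hsh.stack hst
    obtain ⟨_, a8, atop, _, _⟩ := hsh.stack.active bF hbF
    unfold Obj.gLo at g1
    omega
  · have hoff := hsh.off o hoth
    unfold OffStack at hoff
    omega

/-- **Segment 1** (20 instructions; 1057C0H … 10580BH): the six pushes, `sub rsp, 40`, `mov r12, rdi`, `mov [rsp+0x18], rsi`; the
checked 4-byte loads of `gif->SWidth` (`gif + 0`) and `gif->SHeight` (`gif + 4`) — `LiveIn` from `ok.owns`: the object `(F.gif,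
120)` —, each with `digest_int` (16 bytes of stack below the own 88 + 8; the first with `rdi` = the FNV offset). `GifOK` of the
present memory: `GifOK.sameExcept` with `Loose.stack` (the function's stack lies below the cursor: `Ctx.cursor_range`);
the heap's invariant: `HeapInv.sameExcept` (stack windows: `HeapWin.offHeap`) and `.lower`. -/
def Seg1 (Lay : Layout) (μ : Microarch) (u₀ : State) : Prop :=
  ∀ (H : Heap) (rest : List Obj) (frames : List (Nat × FrameLayout)) (F : Forest) (R : Rd) (e : State) (ret : Word),
    AtEntry (conv u₀) Gif.L.digest_file.entry (digest_file.spec H rest frames F R).frame ret e →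
    (digest_file.spec H rest frames F R).pre e →
    ReachVia Lay μ WayInv e (At Gif.L.digest_file.at_10580b H rest frames F R u₀ e ret)

/-- **Segment 2** (18 instructions; 10580BH … 10585AH): the checked 4-byte loads of `gif->SColorResolution` (`gif + 8`) and
`gif->SBackGroundColor` (`gif + 12`), the checked byte load of `gif->AspectByte` (`gif + 16`, `movzx`), each with `digest_int`. -/
def Seg2 (Lay : Layout) (μ : Microarch) (u₀ : State) : Prop :=
  ∀ (H : Heap) (rest : List Obj) (frames : List (Nat × FrameLayout)) (F : Forest) (R : Rd) (e : State) (ret : Word) (v : State),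
    At Gif.L.digest_file.at_10580b H rest frames F R u₀ e ret v →
    ReachVia Lay μ WayInv v (At Gif.L.digest_file.at_10585a H rest frames F R u₀ e ret)

/-- **Segment 3** (17 instructions; 10585AH … 1058A9H): the checked 8-byte load of `gif->SColorMap` (`gif + 24`), `digest_map(h, it)` —
its pre: `MapAt F.scm …` is `ok.shape.scm`, `Owns H (Map.objs F.scm)` a sublist of `ok.owns` (`Owns.sublist`) —; the checked 4-byte
load of `gif->ImageCount` (`gif + 32`: `= F.imgs.length` by `ok.shape.saved`), stored to `[rsp+0xc]`, `digest_int`; `[rsp] = h`,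
`r13d = 0`, `[rsp+0x10] = 0`, `jmp` to the head with the measure `F.imgs.length`. -/
def Seg3 (Lay : Layout) (μ : Microarch) (u₀ : State) : Prop :=
  ∀ (H : Heap) (rest : List Obj) (frames : List (Nat × FrameLayout)) (F : Forest) (R : Rd) (e : State) (ret : Word) (v : State),
    At Gif.L.digest_file.at_10585a H rest frames F R u₀ e ret v →
    ReachVia Lay μ WayInv v (fun w => ∃ m : Nat, Head m H rest frames F R u₀ e ret w)

/-- **Segment 4** (29 instructions; 1059AFH … 1059BAH, 1058A9H … 10591AH): THE LOOP TEST `cmp [rsp+0xc], r13d ; jg` (signed: the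
count is at most `cap`, and the array of `56 · cap` bytes lies in the 4 MB heap: `Owns.inside`): `k ≥ length`: to 1059BAH. Otherwise
there is an array `s` (`F.imgs` is not empty) and `ImgAt (s.arr + 56·k) s.imgs[k]` (`ok.shape.saved`): the checked 8-byte load of
`gif->SavedImages` (`gif + 72`: `= s.arr`), `rbx = s.arr + 56·k` (`8·k − k`, times 8); the checked 4-byte loads of `sp->ImageDesc.Width`
(`sp + 8`, `r15d`) and `.Height` (`sp + 12`, `r14d`) — inside the live array `(s.arr, 56 · s.cap)`, `k < length ≤ cap` —, `rbp` = the
product of their sign extensions: the image is complete (`pre`: `F.Complete`), so `RasterAt` gives `1 ≤ Width`, `1 ≤ Height`,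
`Width · Height < 2^31`: both are positive `int`s and the 64-bit product is exact; the checked loads of `.Left` (`sp + 0`) and `.Top`
(`sp + 4`) with their `digest_int`. -/
def Seg4 (Lay : Layout) (μ : Microarch) (u₀ : State) : Prop :=
  ∀ (H : Heap) (rest : List Obj) (frames : List (Nat × FrameLayout)) (F : Forest) (R : Rd) (e : State) (ret : Word) (m : Nat)
    (v : State),
    Head m H rest frames F R u₀ e ret v →
    ReachVia Lay μ WayInv v (fun w =>
      Round Gif.L.digest_file.at_10591a m H rest frames F R u₀ e ret w ∨
      At Gif.L.digest_file.at_1059ba H rest frames F R u₀ e ret w)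

/-- **Segment 5** (13 instructions; 10591AH … 10594BH): `digest_int(h, r15d)` (Width), `digest_int(h, r14d)` (Height); the checked byte
load of `sp->ImageDesc.Interlace` (`sp + 16`, `movzx`), `digest_int`; `r14 = h`. `rbx rbp r13` are callee-saved: kept by the calls. -/
def Seg5 (Lay : Layout) (μ : Microarch) (u₀ : State) : Prop :=
  ∀ (H : Heap) (rest : List Obj) (frames : List (Nat × FrameLayout)) (F : Forest) (R : Rd) (e : State) (ret : Word) (m : Nat)
    (v : State),
    Round Gif.L.digest_file.at_10591a m H rest frames F R u₀ e ret v →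
    ReachVia Lay μ WayInv v (Round Gif.L.digest_file.at_10594b m H rest frames F R u₀ e ret)

/-- **Segment 6** (25 instructions; 10594BH … 1059AFH): with `g = s.imgs[k]` and `ImgAt sp g` (`ok.shape.saved`): the checked 8-byte
load of `sp->ImageDesc.ColorMap` (`sp + 24`), `digest_map(h, it)` (pre: `ImgAt.cm`; `Owns H (Map.objs g.cm)`: a sublist of
`ok.owns` — `Img.objs g` is a part of `Saved.objs`); the checked 8-byte load of `sp->RasterBits` (`sp + 32`), `digest_bytes(h, it, n)`:
`g.raster = some r` (`F.Complete`), the pointer is `r.1`, `n = rbp = r.2` (`RasterAt`), the live object `(r.1, r.2)` (`Owns.liveIn`);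
the checked loads of `sp->ExtensionBlocks` (`sp + 48`, `r14`) and `sp->ExtensionBlockCount` (`sp + 40`, `esi`: zero-extended),
`digest_extensions(h, count, blocks)` (pre: `ImgAt.ext`; `Owns H (Exts.objs g.ext)`); `[rsp] = h`, `add [rsp+0x10], rbp`,
`add r13d, 1`; back to the head with the measure `m − 1`. Every callee writes stack only (the deepest: `digest_extensions`, 128 bytes
below the own 88 + 8 = the contract's 224): `GifOK.sameExcept` with `Loose.stack`, after each. -/
def Seg6 (Lay : Layout) (μ : Microarch) (u₀ : State) : Prop :=
  ∀ (H : Heap) (rest : List Obj) (frames : List (Nat × FrameLayout)) (F : Forest) (R : Rd) (e : State) (ret : Word) (m : Nat)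
    (v : State),
    Round Gif.L.digest_file.at_10594b m H rest frames F R u₀ e ret v →
    ReachVia Lay μ WayInv v (fun w => ∃ m' : Nat, m' < m ∧ Head m' H rest frames F R u₀ e ret w)

/-- **Segment 7** (24 instructions; 1059BAH … 105A0EH): the checked loads of `gif->ExtensionBlocks` (`gif + 88`, `rbx`) and
`gif->ExtensionBlockCount` (`gif + 80`, `esi`), `digest_extensions(h, count, blocks)` of the pending list (pre: `ok.shape.pend`;
`Owns H (Exts.objs F.pend)`: a sublist of `ok.owns`); `r15 = pixels` (from its slot), THE CHECKED 8-BYTE STORE `*pixels = total`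
(`__asan_store8_noabort`: `LiveIn` from `pre`; the window is the contract's, in the stack region: no shadow byte; above the return
address: `pixels_above`, so `slot_r15 … slot_rbx`, `slot_ra` hold behind the store); `rax = h`, `add rsp, 40`, six pops, `ret`: the
contract's `Returned` (`post` = `ShadowUntouched`). -/
def Seg7 (Lay : Layout) (μ : Microarch) (u₀ : State) : Prop :=
  ∀ (H : Heap) (rest : List Obj) (frames : List (Nat × FrameLayout)) (F : Forest) (R : Rd) (e : State) (ret : Word) (v : State),
    At Gif.L.digest_file.at_1059ba H rest frames F R u₀ e ret v →
    ReachVia Lay μ WayInv v (Returned (conv u₀) (digest_file.spec H rest frames F R) e ret)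

/-- **THE IMAGE LOOP**, from its head with the measure `m`: by strong induction on `m`. A round is segment 4 (to 1059BAH: segment 7;
or into the round), segment 5, segment 6 (back to the head with a smaller measure). -/
theorem fromHead {Lay : Layout} {μ : Microarch} {u₀ : State} (h4 : Seg4 Lay μ u₀) (h5 : Seg5 Lay μ u₀) (h6 : Seg6 Lay μ u₀)
    (h7 : Seg7 Lay μ u₀)
    (H : Heap) (rest : List Obj) (frames : List (Nat × FrameLayout)) (F : Forest) (R : Rd) (e : State) (ret : Word) :
    ∀ (m : Nat) (v : State),
      Head m H rest frames F R u₀ e ret v →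
      ReachVia Lay μ WayInv v (Returned (conv u₀) (digest_file.spec H rest frames F R) e ret) := by
  intro m
  induction m using Nat.strongRecOn with
  | _ m ih =>
    intro v hv
    refine (h4 H rest frames F R e ret m v hv).trans ?_
    intro w hw
    rcases hw with hr | hout
    · refine (h5 H rest frames F R e ret m w hr).trans ?_
      intro x hx
      refine (h6 H rest frames F R e ret m x hx).trans ?_
      intro y hy
      obtain ⟨m', hlt, hh⟩ := hy
      exact ih m' hlt y hh
    · exact h7 H rest frames F R e ret w hout

/-- **The composition of `digest_file`**: the seven segments chain into the function's contract. -/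
theorem compose {Lay : Layout} {μ : Microarch} {u₀ : State} (h1 : Seg1 Lay μ u₀) (h2 : Seg2 Lay μ u₀) (h3 : Seg3 Lay μ u₀)
    (h4 : Seg4 Lay μ u₀) (h5 : Seg5 Lay μ u₀) (h6 : Seg6 Lay μ u₀) (h7 : Seg7 Lay μ u₀) :
    ∀ (H : Heap) (rest : List Obj) (frames : List (Nat × FrameLayout)) (F : Forest) (R : Rd),
      Calls Lay μ WayInv (conv u₀) Gif.L.digest_file.entry (digest_file.spec H rest frames F R) := by
  intro H rest frames F R e ret he hp
  refine (h1 H rest frames F R e ret he hp).trans ?_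
  intro v1 hv1
  refine (h2 H rest frames F R e ret v1 hv1).trans ?_
  intro v2 hv2
  refine (h3 H rest frames F R e ret v2 hv2).trans ?_
  intro v3 hv3
  obtain ⟨m, hm⟩ := hv3
  exact fromHead h4 h5 h6 h7 H rest frames F R e ret m v3 hm

end digest_file

end Gif.Spec
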